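-- pv_equiv track=rewrite | github.com/ishithakodali/AI-Assignment-3 | ugv_navigation.py | turns_in_path
-- ===== SOURCE A (Python) =====
-- from typing import Dict, Iterable, List, Optional, Set, Tuple
--
-- GridPos = Tuple[int, int]
--
-- def turns_in_path(path: List[GridPos]) -> int:
--     if len(path) < 3:
--         return 0
--
--     turns = 0
--     for i in range(2, len(path)):
--         d1 = (path[i - 1][0] - path[i - 2][0], path[i - 1][1] - path[i - 2][1])
--         d2 = (path[i][0] - path[i - 1][0], path[i][1] - path[i - 1][1])
--         if d1 != d2:
--             turns += 1
--     return turns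
-- ===== SOURCE B (Python) =====
-- from typing import Dict, Iterable, List, Optional, Set, Tuple
--
-- GridPos = Tuple[int, int]
--
-- def turns_in_path(path: List[GridPos]) -> int:
--     # Run-length compression: collapse consecutive equal step vectors into one
--     # representative each; the path then consists of len(compressed) straight
--     # segments, and each boundary between two segments is exactly one turn.
--     compressed = []
--     for i in range(1, len(path)):
--         d = (path[i][0] - path[i - 1][0], path[i][1] - path[i - 1][1])
--         if not compressed or compressed[-1] != d:
--             compressed.append(d)
--     return max(len(compressed) - 1, 0)
-- ===== Notes on version B (the rewrite author's own statement) =====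
-- stated objective: alternative
-- what changed: A counts index positions whose two adjacent step vectors differ in one fused loop; B instead run-length-compresses the step vectors into a list of straight segments and returns number-of-segments minus one.
import Mathlib
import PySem

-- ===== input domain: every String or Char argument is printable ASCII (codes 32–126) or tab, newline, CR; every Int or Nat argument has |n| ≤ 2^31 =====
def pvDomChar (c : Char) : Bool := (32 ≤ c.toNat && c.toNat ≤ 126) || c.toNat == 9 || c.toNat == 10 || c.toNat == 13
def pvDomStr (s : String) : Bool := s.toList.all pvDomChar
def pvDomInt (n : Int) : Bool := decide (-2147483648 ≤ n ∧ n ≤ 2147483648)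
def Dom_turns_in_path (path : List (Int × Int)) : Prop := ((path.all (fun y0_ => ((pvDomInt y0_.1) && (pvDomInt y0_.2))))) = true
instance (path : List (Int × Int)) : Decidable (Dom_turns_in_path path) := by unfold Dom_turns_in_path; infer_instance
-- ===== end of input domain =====

-- B replaces A's mismatch-counting loop by run-length compression of the step vectors
-- (turns = number of straight segments minus one); alternative algorithm, same cost.

-- ===== PORT A =====
-- the body of A's single fused index loop (recomputes both step vectors from path[i-2..i] each iteration)
def aBody (path : List (Int × Int)) (turns : Int) (i : Int) : Int :=
  let d1 : Int × Int :=
    ((PySem.List.pyGetD path (i - 1) (0, 0)).1 - (PySem.List.pyGetD path (i - 2) (0, 0)).1,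
     (PySem.List.pyGetD path (i - 1) (0, 0)).2 - (PySem.List.pyGetD path (i - 2) (0, 0)).2)
  let d2 : Int × Int :=
    ((PySem.List.pyGetD path i (0, 0)).1 - (PySem.List.pyGetD path (i - 1) (0, 0)).1,
     (PySem.List.pyGetD path i (0, 0)).2 - (PySem.List.pyGetD path (i - 1) (0, 0)).2)
  if d1 ≠ d2 then turns + 1 else turns
  -- all indices are in range for i ∈ range(2, len path), so the default of pyGetD is never taken

def turns_in_path (path : List (Int × Int)) : Int :=
  if path.length < 3 then 0
  else (PySem.List.pyRange 2 (path.length : Int) 1).foldl (aBody path) 0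

-- ===== PORT B =====
-- the body of B's loop: compute step vector d, append it to `compressed` unless it repeats the last run
def bBody (path : List (Int × Int)) (comp : List (Int × Int)) (i : Int) : List (Int × Int) :=
  let d : Int × Int :=
    ((PySem.List.pyGetD path i (0, 0)).1 - (PySem.List.pyGetD path (i - 1) (0, 0)).1,
     (PySem.List.pyGetD path i (0, 0)).2 - (PySem.List.pyGetD path (i - 1) (0, 0)).2)
  if comp.isEmpty ∨ PySem.List.pyGetD comp (-1) (0, 0) ≠ d then comp ++ [d] else comp
  -- `compressed[-1]` is only read when `compressed` is nonempty (Python's `or` short-circuits),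
  -- so the default of pyGetD is never taken

def turns_in_path_alt (path : List (Int × Int)) : Int :=
  let compressed := (PySem.List.pyRange 1 (path.length : Int) 1).foldl (bBody path) []
  max ((compressed.length : Int) - 1) 0

-- ===== PRECONDITION & SPEC =====
def Spec_turns_in_path (path : List (Int × Int)) (out : Int) : Prop := out = turns_in_path_alt path
instance (path : List (Int × Int)) (out : Int) : Decidable (Spec_turns_in_path path out) := by unfold Spec_turns_in_path; infer_instance

-- ===== CLAIM (what is proved, stated in full; the proofs are below) =====
def Claim_equal_turns_in_path : Prop := ∀ (path : List (Int × Int)), Dom_turns_in_path path → Spec_turns_in_path path (turns_in_path path)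

-- ===== LEMMAS AND PROOFS =====

-- step vector between consecutive positions
def pvDelta (a b : Int × Int) : Int × Int := (b.1 - a.1, b.2 - a.2)

-- the step-vector list of a path
def pvDeltas : List (Int × Int) → List (Int × Int)
  | a :: b :: t => pvDelta a b :: pvDeltas (b :: t)
  | _ => []

-- number of adjacent differing pairs (= run boundaries), threaded with the previous element
def pvCnt : (Int × Int) → List (Int × Int) → Nat
  | _, [] => 0
  | prev, e :: es => (if prev ≠ e then 1 else 0) + pvCnt e es

-- B's loop body, abstracted over the already-computed step vector
def bStep (comp : List (Int × Int)) (d : Int × Int) : List (Int × Int) :=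
  if comp.getLast? ≠ some d then comp ++ [d] else comp

theorem pyGetD_cons_succ (x : Int × Int) (xs : List (Int × Int)) (j : Int) (hj : 0 ≤ j) :
    PySem.List.pyGetD (x :: xs) (j + 1) (0, 0) = PySem.List.pyGetD xs j (0, 0) := by
  obtain ⟨n, rfl⟩ := Int.eq_ofNat_of_zero_le hj
  simp [PySem.List.pyGetD, PySem.List.pyGet?, PySem.List.pyIdx?]
  rw [if_pos (by omega : (0:Int) ≤ ↑n + 1)]
  by_cases h : n < xs.length <;> simp [h]

-- ---- A side ----

theorem body_shift (x : Int × Int) (xs : List (Int × Int)) (acc : Int) (i : Int) (hi : 2 ≤ i) :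
    aBody (x :: xs) acc (i + 1) = aBody xs acc i := by
  unfold aBody
  rw [show i + 1 - 1 = (i - 1) + 1 by ring, show i + 1 - 2 = (i - 2) + 1 by ring,
      pyGetD_cons_succ _ _ i (by omega), pyGetD_cons_succ _ _ (i - 1) (by omega),
      pyGetD_cons_succ _ _ (i - 2) (by omega)]

theorem range_shift (m : Int) :
    PySem.List.pyRange 3 m 1 = (PySem.List.pyRange 2 (m - 1) 1).map (· + 1) := by
  rw [PySem.List.pyRange_one, PySem.List.pyRange_one, List.map_map]
  have : (m - 3).toNat = (m - 1 - 2).toNat := by omega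
  rw [this]
  exact List.map_congr_left (fun k _ => by simp; ring)

theorem shift_fold (m : Int) (x : Int × Int) (xs : List (Int × Int)) (acc : Int) :
    (PySem.List.pyRange 3 m 1).foldl (aBody (x :: xs)) acc
      = (PySem.List.pyRange 2 (m - 1) 1).foldl (aBody xs) acc := by
  rw [range_shift, List.foldl_map]
  exact PySem.List.foldl_congr_mem _ _ _ _ (fun acc i hi => by
    have h2 : 2 ≤ i := ((PySem.List.mem_pyRange_one).1 hi).1
    exact body_shift x xs acc i h2)

theorem lemA : ∀ (xs : List (Int × Int)) (p q : Int × Int) (acc : Int),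
    (PySem.List.pyRange 2 ((xs.length : Int) + 2) 1).foldl (aBody (p :: q :: xs)) acc
      = acc + (pvCnt (pvDelta p q) (pvDeltas (q :: xs)) : Int)
  | [], p, q, acc => by
      rw [show ((([]:List (Int×Int)).length : Int) + 2) = 2 by simp]
      simp [PySem.List.pyRange_one_eq_nil (le_refl (2:Int)), pvDeltas, pvCnt]
  | c :: t, p, q, acc => by
      rw [PySem.List.pyRange_one_cons (by simp)]
      simp only [List.foldl_cons]
      rw [show (2:Int) + 1 = 3 by norm_num]
      rw [show ((((c :: t).length : Int)) + 2) = ((t.length : Int) + 2) + 1 by simp; ring]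
      rw [shift_fold, show ((t.length : Int) + 2 + 1 - 1) = (t.length : Int) + 2 by ring]
      rw [lemA t q c]
      have hbody : aBody (p :: q :: c :: t) acc 2
          = if pvDelta p q ≠ pvDelta q c then acc + 1 else acc := by
        have h1 : (0:Int) ≤ (t.length : Int) + 1 := by positivity
        have h2 : (2:Int) ≤ (t.length : Int) + 1 + 1 := by omega
        have h3 : (0:Int) ≤ (t.length : Int) + 1 + 1 := by positivity
        simp [aBody, PySem.List.pyGetD, PySem.List.pyGet?, PySem.List.pyIdx?, pvDelta, h1, h2, h3]
      rw [hbody]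
      have hdel : pvDeltas (q :: c :: t) = pvDelta q c :: pvDeltas (c :: t) := by
        simp [pvDeltas, pvDelta]
      rw [hdel, pvCnt]
      split_ifs <;> push_cast <;> ring

-- ---- B side ----

-- bBody with the index shifted by one position of the path is bBody of the tail
theorem bBody_shift (x : Int × Int) (xs : List (Int × Int)) (comp : List (Int × Int)) (i : Int) (hi : 1 ≤ i) :
    bBody (x :: xs) comp (i + 1) = bBody xs comp i := by
  unfold bBody
  rw [show i + 1 - 1 = (i - 1) + 1 by ring,
      pyGetD_cons_succ _ _ i (by omega), pyGetD_cons_succ _ _ (i - 1) (by omega)]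

theorem range_shift1 (m : Int) :
    PySem.List.pyRange 2 m 1 = (PySem.List.pyRange 1 (m - 1) 1).map (· + 1) := by
  rw [PySem.List.pyRange_one, PySem.List.pyRange_one, List.map_map]
  have : (m - 2).toNat = (m - 1 - 1).toNat := by omega
  rw [this]
  exact List.map_congr_left (fun k _ => by simp; ring)

theorem shift_foldB (m : Int) (x : Int × Int) (xs : List (Int × Int)) (comp : List (Int × Int)) :
    (PySem.List.pyRange 2 m 1).foldl (bBody (x :: xs)) comp
      = (PySem.List.pyRange 1 (m - 1) 1).foldl (bBody xs) comp := by
  rw [range_shift1, List.foldl_map]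
  exact PySem.List.foldl_congr_mem _ _ _ _ (fun comp i hi => by
    have h1 : 1 ≤ i := ((PySem.List.mem_pyRange_one).1 hi).1
    exact bBody_shift x xs comp i h1)

-- bBody's condition (isEmpty / compressed[-1]) coincides with bStep's getLast? test
theorem bBody_head (p q : Int × Int) (xs : List (Int × Int)) (comp : List (Int × Int)) :
    bBody (p :: q :: xs) comp 1 = bStep comp (pvDelta p q) := by
  unfold bBody bStep
  have hq : PySem.List.pyGetD (p :: q :: xs) 1 (0, 0) = q := by
    simp [PySem.List.pyGetD, PySem.List.pyGet?, PySem.List.pyIdx?]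
  rw [show (1:Int) - 1 = 0 by ring, PySem.List.pyGetD_zero_cons, hq]
  cases comp with
  | nil => simp [pvDelta]
  | cons c cs =>
      simp only [List.isEmpty_cons,
        PySem.List.pyGetD_neg_one (c :: cs) (0, 0) (by simp), pvDelta]
      simp [List.getLast?_eq_some_getLast]

theorem lemB : ∀ (xs : List (Int × Int)) (p : Int × Int) (comp : List (Int × Int)),
    (PySem.List.pyRange 1 ((xs.length : Int) + 1) 1).foldl (bBody (p :: xs)) comp
      = List.foldl bStep comp (pvDeltas (p :: xs))
  | [], p, comp => by
      rw [show ((([]:List (Int×Int)).length : Int) + 1) = 1 by simp]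
      simp [PySem.List.pyRange_one_eq_nil (le_refl (1:Int)), pvDeltas]
  | q :: t, p, comp => by
      rw [PySem.List.pyRange_one_cons (by simp)]
      simp only [List.foldl_cons]
      rw [show (1:Int) + 1 = 2 by norm_num]
      rw [show ((((q :: t).length : Int)) + 1) = ((t.length : Int) + 1) + 1 by simp]
      rw [shift_foldB, show ((t.length : Int) + 1 + 1 - 1) = (t.length : Int) + 1 by ring]
      rw [bBody_head, lemB t q]
      rfl

-- length of the compression fold, threaded with the current last run
theorem len_fold : ∀ (ds comp : List (Int × Int)) (l : Int × Int), comp.getLast? = some l →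
    (List.foldl bStep comp ds).length = comp.length + pvCnt l ds
  | [], comp, l, _ => by simp [pvCnt]
  | e :: es, comp, l, h => by
      simp only [List.foldl_cons, bStep, h, pvCnt]
      by_cases he : l = e
      · subst he
        rw [if_neg (by simp), len_fold es comp l h]
        simp
      · rw [if_pos (by simp [he]), len_fold es (comp ++ [e]) e (by simp)]
        simp [he]
        omega

-- characterization of B on a nonempty path
theorem alt_char (p : Int × Int) (xs : List (Int × Int)) :
    turns_in_path_alt (p :: xs)
      = max (((List.foldl bStep [] (pvDeltas (p :: xs))).length : Int) - 1) 0 := by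
  unfold turns_in_path_alt
  rw [show (((p :: xs).length : Int)) = ((xs.length : Int)) + 1 by simp]
  rw [lemB]

theorem main_eq : ∀ (path : List (Int × Int)), turns_in_path path = turns_in_path_alt path
  | [] => by decide
  | [a] => by
      rw [alt_char]
      simp [turns_in_path, pvDeltas]
  | [a, b] => by
      rw [alt_char]
      have : List.foldl bStep [] (pvDeltas [a, b]) = [pvDelta a b] := by
        simp [pvDeltas, bStep]
      rw [this, turns_in_path, if_pos (by simp)]
      simp
  | a :: b :: c :: t => by
      rw [alt_char, turns_in_path, if_neg (by simp)]
      rw [show (((a :: b :: c :: t).length : Int)) = ((c :: t).length : Int) + 2 by simp; ring]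
      rw [lemA (c :: t) a b 0]
      have hd : pvDeltas (a :: b :: c :: t) = pvDelta a b :: pvDeltas (b :: c :: t) := by
        simp [pvDeltas]
      rw [hd]
      have hfold : List.foldl bStep [] (pvDelta a b :: pvDeltas (b :: c :: t))
          = List.foldl bStep [pvDelta a b] (pvDeltas (b :: c :: t)) := by
        simp [bStep]
      rw [hfold, len_fold (pvDeltas (b :: c :: t)) [pvDelta a b] (pvDelta a b) (by simp)]
      simp

-- ===== VERDICT (by name: the statement is the Claim_ definition above) =====
theorem turns_in_path_spec : Claim_equal_turns_in_path := by
  intro path _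
  unfold Spec_turns_in_path
  exact main_eq path
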